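-- pv_equiv track=rewrite | github.com/sercxanto/logseq_to_obsidian | src/logseq_to_obsidian/__init__.py | _is_fence
-- ===== SOURCE A (Python) =====
-- def _is_fence(line: str) -> bool:
--     s = line.lstrip()
--     # Allow fences that appear inside list items like "- ```" or "1. ```"
--     t = s
--     if t and t[0] in "-*+" and len(t) > 1 and t[1].isspace():
--         t = t[2:].lstrip()
--     else:
--         j = 0
--         while j < len(t) and t[j].isdigit():
--             j += 1
--         if j > 0 and j < len(t) and t[j] in ".)":
--             j += 1
--             if j < len(t) and t[j].isspace():
--                 t = t[j + 1 :].lstrip()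
--     return t.startswith("```")
-- ===== SOURCE B (Python) =====
-- def _is_fence(line: str) -> bool:
--     # Tokenize instead of index-scanning: a list marker ("-", "*", "+" or
--     # digits followed by "." / ")") is exactly a whole whitespace-separated
--     # first token; if present, the fence must open the remainder.
--     parts = line.split(None, 1)
--     if len(parts) == 2:
--         head, rest = parts
--         if head in ("-", "*", "+") or (head[:-1].isdigit() and head[-1] in ".)"):
--             return rest.startswith("```")
--     return line.lstrip().startswith("```")
-- ===== Notes on version B (the rewrite author's own statement) =====
-- stated objective: idiomatic
-- what changed: B tokenizes the line with str.split(None, 1) and tests whether the first whitespace-delimited token is a list marker, instead of A's manual lstrip/index scanning with a digit-counting while loop.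
import Mathlib
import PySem

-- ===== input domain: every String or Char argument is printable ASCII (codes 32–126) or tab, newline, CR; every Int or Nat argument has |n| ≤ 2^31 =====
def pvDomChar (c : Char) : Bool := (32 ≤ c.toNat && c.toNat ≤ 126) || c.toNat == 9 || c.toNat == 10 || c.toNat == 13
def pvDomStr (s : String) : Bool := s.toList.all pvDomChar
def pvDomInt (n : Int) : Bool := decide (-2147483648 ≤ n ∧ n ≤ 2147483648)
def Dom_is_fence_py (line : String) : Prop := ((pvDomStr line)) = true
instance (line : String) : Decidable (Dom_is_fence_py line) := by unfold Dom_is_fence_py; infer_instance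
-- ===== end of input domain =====

-- B tokenizes with str.split(None, 1) instead of A's index scanning; same result, no speed claim.

-- ===== PORT A =====
-- the while loop 'j = 0; while j < len(t) and t[j].isdigit(): j += 1' as structural recursion
def pvCountDigits : List Char → Nat
  | [] => 0
  | c :: cs => if PySem.Chars.isdigit c then pvCountDigits cs + 1 else 0

def is_fence_py (line : String) : Bool :=
  let s := PySem.Chars.lstrip line.toList
  let t := s
  let t :=
    if !t.isEmpty
        && ((PySem.List.pyGet? t 0).elim false fun c => c == '-' || c == '*' || c == '+')
        && decide (1 < t.length)
        && ((PySem.List.pyGet? t 1).elim false PySem.Chars.isspace) then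
      PySem.Chars.lstrip (PySem.List.slice t (some 2) none)
    else
      let j := pvCountDigits t
      if decide (0 < j) && decide (j < t.length)
          && ((PySem.List.pyGet? t (j : Int)).elim false fun c => c == '.' || c == ')') then
        let j := j + 1
        if decide (j < t.length) && ((PySem.List.pyGet? t (j : Int)).elim false PySem.Chars.isspace) then
          PySem.Chars.lstrip (PySem.List.slice t (some ((j : Int) + 1)) none)
        else t
      else t
  PySem.Chars.startswith t ['`', '`', '`']

-- ===== PORT B =====
def is_fence_py_alt (line : String) : Bool :=
  match PySem.Chars.split₀Max line.toList 1 with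
  | [head, rest] =>
    if (head == ['-'] || head == ['*'] || head == ['+'])
        || (PySem.Chars.strIsdigit (PySem.Chars.slice head none (some (-1)))
            && ((PySem.List.pyGet? head (-1)).elim false fun c => c == '.' || c == ')')) then
      PySem.Chars.startswith rest ['`', '`', '`']
    else
      PySem.Chars.startswith (PySem.Chars.lstrip line.toList) ['`', '`', '`']
  | _ => PySem.Chars.startswith (PySem.Chars.lstrip line.toList) ['`', '`', '`']

-- ===== PRECONDITION & SPEC =====
def Spec_is_fence_py (line : String) (out : Bool) : Prop := out = is_fence_py_alt line
instance (line : String) (out : Bool) : Decidable (Spec_is_fence_py line out) := by unfold Spec_is_fence_py; infer_instance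

-- ===== CLAIM (what is proved, stated in full; the proofs are below) =====
def Claim_equal_is_fence_py : Prop := ∀ (line : String), Dom_is_fence_py line → Spec_is_fence_py line (is_fence_py line)

-- ===== LEMMAS AND PROOFS =====

-- char facts
lemma pvDigitNotSpace (c : Char) (h : PySem.Chars.isdigit c = true) : PySem.Chars.isspace c = false := by
  simp only [PySem.Chars.isdigit, Bool.and_eq_true, decide_eq_true_eq] at h
  obtain ⟨h1, h2⟩ := h
  have h1' : 48 ≤ c.toNat := h1
  have h2' : c.toNat ≤ 57 := h2
  simp only [PySem.Chars.isspace, Bool.or_eq_false_iff, Bool.and_eq_false_iff,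
    decide_eq_false_iff_not, not_le]
  omega
lemma pvDigitNe (c x : Char) (h : PySem.Chars.isdigit c = true)
    (hx : PySem.Chars.isdigit x = false) : c ≠ x := by
  intro e; rw [e, hx] at h; exact Bool.noConfusion h

-- list facts
lemma pvHeadDrop {α : Type} (q : α → Bool) (l : List α) (x : α) (xs : List α)
    (h : List.dropWhile q l = x :: xs) : q x = false := by
  induction l with
  | nil => simp at h
  | cons a as ih =>
    rw [List.dropWhile_cons] at h
    by_cases ha : q a = true
    · rw [if_pos ha] at h; exact ih h
    · rw [if_neg ha] at h
      cases h; simpa using ha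
lemma pvTakeAll {α : Type} (p : α → Bool) (xs : List α) (h : ∀ x ∈ xs, p x = true) :
    List.takeWhile p xs = xs := by
  induction xs with
  | nil => rfl
  | cons a as ih =>
    rw [List.takeWhile_cons, if_pos (h a (by simp))]
    rw [ih (fun x hx => h x (by simp [hx]))]
lemma pvTakeAppend {α : Type} (p : α → Bool) (xs ys : List α) (h : ∀ x ∈ xs, p x = true) :
    List.takeWhile p (xs ++ ys) = xs ++ List.takeWhile p ys := by
  rw [List.takeWhile_append, if_pos (by rw [pvTakeAll p xs h])]
lemma pvDropAppend {α : Type} (p : α → Bool) (xs ys : List α) (h : ∀ x ∈ xs, p x = true) :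
    List.dropWhile p (xs ++ ys) = List.dropWhile p ys := by
  induction xs with
  | nil => simp
  | cons a as ih =>
    rw [List.cons_append, List.dropWhile_cons, if_pos (h a (by simp))]
    exact ih (fun x hx => h x (by simp [hx]))

lemma pvGet0 {α : Type} (c : α) (v : List α) : PySem.List.pyGet? (c :: v) 0 = some c := by
  simpa using PySem.List.pyGet?_natCast (c :: v) 0
lemma pvGet1 {α : Type} (c d : α) (v : List α) : PySem.List.pyGet? (c :: d :: v) 1 = some d := by
  simpa using PySem.List.pyGet?_natCast (c :: d :: v) 1
lemma pvGetNat {α : Type} (xs : List α) (k : ℕ) : PySem.List.pyGet? xs (k : ℤ) = xs[k]? :=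
  PySem.List.pyGet?_natCast xs k
lemma pvGetLast {α : Type} (xs : List α) (x : α) : PySem.List.pyGet? (xs ++ [x]) (-1) = some x := by
  simp [PySem.List.pyGet?, PySem.List.pyIdx?]
lemma pvSliceFrom {α : Type} (xs : List α) (k : ℕ) :
    PySem.List.slice xs (some (k : ℤ)) none = xs.drop k := by
  simpa using PySem.List.slice_from xs (a := (k : ℤ)) (by positivity)
lemma pvSliceDropLast {α : Type} (xs : List α) :
    PySem.List.slice xs none (some (-1)) = xs.dropLast := by
  simp only [PySem.List.slice, PySem.List.clampIdx, List.dropLast_eq_take]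
  norm_num
  split <;> rename_i h2
  · subst h2; simp
  · have : xs.length ≠ 0 := by simpa using h2
    omega

def pvFence : List Char := ['`', '`', '`']

lemma pvSwNil : PySem.Chars.startswith [] pvFence = false := by decide
lemma pvSwCons (c : Char) (X : List Char) (hc : c ≠ '`') :
    PySem.Chars.startswith (c :: X) pvFence = false := by
  simp [PySem.Chars.startswith, pvFence, List.isPrefixOf]
  intro h; exact absurd h.symm hc

lemma pvConsNotSingle (c y : Char) (X : List Char) (h : (c == y) = false) :
    (c :: X == [y]) = false := by
  rw [beq_eq_false_iff_ne] at h ⊢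
  intro e
  injection e with e1 _
  exact h e1

lemma pvNotSingle (w : List Char) (h : 2 ≤ w.length) (y : Char) : (w == [y]) = false := by
  rw [beq_eq_false_iff_ne]
  intro e; rw [e] at h; simp at h

def pvT (t : List Char) : List Char :=
  if !t.isEmpty
      && ((PySem.List.pyGet? t 0).elim false fun c => c == '-' || c == '*' || c == '+')
      && decide (1 < t.length)
      && ((PySem.List.pyGet? t 1).elim false PySem.Chars.isspace) then
    PySem.Chars.lstrip (PySem.List.slice t (some 2) none)
  else
    let j := pvCountDigits t
    if decide (0 < j) && decide (j < t.length)
        && ((PySem.List.pyGet? t (j : Int)).elim false fun c => c == '.' || c == ')') then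
      let j := j + 1
      if decide (j < t.length) && ((PySem.List.pyGet? t (j : Int)).elim false PySem.Chars.isspace) then
        PySem.Chars.lstrip (PySem.List.slice t (some ((j : Int) + 1)) none)
      else t
    else t

def pvMarker (w : List Char) : Bool :=
  (w == ['-'] || w == ['*'] || w == ['+'])
    || (PySem.Chars.strIsdigit (PySem.Chars.slice w none (some (-1)))
        && ((PySem.List.pyGet? w (-1)).elim false fun c => c == '.' || c == ')'))

def pvB (u : List Char) : Bool :=
  let w := u.takeWhile (fun c => !PySem.Chars.isspace c)
  let r := List.dropWhile PySem.Chars.isspace (u.dropWhile (fun c => !PySem.Chars.isspace c))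
  if u = [] then PySem.Chars.startswith u pvFence
  else if r = [] then PySem.Chars.startswith u pvFence
  else if pvMarker w then PySem.Chars.startswith r pvFence
  else PySem.Chars.startswith u pvFence

lemma pvCountDigits_eq (u : List Char) :
    pvCountDigits u = (u.takeWhile PySem.Chars.isdigit).length := by
  induction u with
  | nil => rfl
  | cons c cs ih =>
    simp only [pvCountDigits, List.takeWhile]
    by_cases h : PySem.Chars.isdigit c = true <;> simp [h, ih]

lemma pvT_cond1 (c d : Char) (rest : List Char) (hm : c = '-' ∨ c = '*' ∨ c = '+')
    (hd : PySem.Chars.isspace d = true) :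
    pvT (c :: d :: rest) = List.dropWhile PySem.Chars.isspace rest := by
  rw [pvT, if_pos]
  · rw [show (2 : ℤ) = ((2 : ℕ) : ℤ) from rfl, pvSliceFrom]
    rfl
  · rw [pvGet0, pvGet1]
    rcases hm with rfl | rfl | rfl <;> simp [hd]
lemma pvC1_false (c : Char) (v : List Char) (hm : ¬(c = '-' ∨ c = '*' ∨ c = '+')) :
    (!(c :: v).isEmpty
      && ((PySem.List.pyGet? (c :: v) 0).elim false fun x => x == '-' || x == '*' || x == '+')
      && decide (1 < (c :: v).length)
      && ((PySem.List.pyGet? (c :: v) 1).elim false PySem.Chars.isspace)) = false := by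
  push_neg at hm
  rw [pvGet0]
  simp [hm.1, hm.2.1, hm.2.2]

lemma pvMain (u : List Char) (hu : List.dropWhile PySem.Chars.isspace u = u) :
    PySem.Chars.startswith (pvT u) pvFence = pvB u := by
  cases u with
  | nil => rfl
  | cons c v =>
    have hc : PySem.Chars.isspace c = false := by
      by_contra h
      rw [Bool.not_eq_false] at h
      rw [List.dropWhile_cons, if_pos h] at hu
      have hlen := congrArg List.length hu
      have h2 := List.length_dropWhile_le (p := PySem.Chars.isspace) (l := v)
      simp at hlen; omega
    by_cases hm : c = '-' ∨ c = '*' ∨ c = '+'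
    · -- marker head character
      have hcd : PySem.Chars.isdigit c = false := by rcases hm with rfl | rfl | rfl <;> decide
      have hcb : c ≠ '`' := by rcases hm with rfl | rfl | rfl <;> decide
      cases v with
      | nil =>
        have ht : pvT [c] = [c] := by
          rw [pvT, if_neg]
          · simp [pvCountDigits, hcd]
          · simp
        rw [ht, pvB]
        simp [List.dropWhile_cons, List.takeWhile_cons, hc]
      | cons d rest =>
        by_cases hd : PySem.Chars.isspace d = true
        · -- cond1 holds: "- ```" style
          rw [pvT_cond1 c d rest hm hd, pvB]
          have hw : List.takeWhile (fun x => !PySem.Chars.isspace x) (c :: d :: rest) = [c] := by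
            simp [List.takeWhile_cons, hc, hd]
          have hv' : List.dropWhile (fun x => !PySem.Chars.isspace x) (c :: d :: rest) = d :: rest := by
            simp [List.dropWhile_cons, hc, hd]
          have hr : List.dropWhile PySem.Chars.isspace (d :: rest)
              = List.dropWhile PySem.Chars.isspace rest := by
            simp [List.dropWhile_cons, hd]
          simp only [hw, hv', hr]
          by_cases hrn : List.dropWhile PySem.Chars.isspace rest = []
          · rw [if_neg (by simp), if_pos hrn, hrn, pvSwNil, pvSwCons c _ hcb]
          · rw [if_neg (by simp), if_neg hrn, if_pos]
            rcases hm with rfl | rfl | rfl <;> simp [pvMarker]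
        · -- marker char but no whitespace after it: nothing stripped
          have hd' : PySem.Chars.isspace d = false := by simpa using hd
          have ht : pvT (c :: d :: rest) = c :: d :: rest := by
            rw [pvT, if_neg, if_neg]
            · simp [pvCountDigits, hcd]
            · rw [pvGet0, pvGet1]
              simp [hd]
          rw [ht, pvB]
          have hw : List.takeWhile (fun x => !PySem.Chars.isspace x) (c :: d :: rest)
              = c :: d :: List.takeWhile (fun x => !PySem.Chars.isspace x) rest := by
            simp [List.takeWhile_cons, hc, hd']
          simp only [hw]
          have hmk : pvMarker (c :: d :: List.takeWhile (fun x => !PySem.Chars.isspace x) rest) = false := by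
            rw [pvMarker, PySem.Chars.slice_eq_listSlice, pvSliceDropLast]
            have : (c :: d :: List.takeWhile (fun x => !PySem.Chars.isspace x) rest).dropLast
                = c :: (d :: List.takeWhile (fun x => !PySem.Chars.isspace x) rest).dropLast := by
              simp
            rw [this]
            simp [PySem.Chars.strIsdigit, hcd]
          rw [hmk]
          split <;> [rfl; (split <;> [rfl; rfl])]
    · -- non-marker head: A's else branch
      have hC1 := pvC1_false c v hm
      have hcne : (c == '-') = false ∧ (c == '*') = false ∧ (c == '+') = false := by
        constructor
        · simp; intro h; exact hm (Or.inl h)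
        constructor
        · simp; intro h; exact hm (Or.inr (Or.inl h))
        · simp; intro h; exact hm (Or.inr (Or.inr h))
      have hsplit := List.takeWhile_append_dropWhile (p := PySem.Chars.isdigit) (l := c :: v)
      have hds : ∀ x ∈ List.takeWhile PySem.Chars.isdigit (c :: v), PySem.Chars.isdigit x = true :=
        fun x hx => List.mem_takeWhile_imp hx
      cases he : List.dropWhile PySem.Chars.isdigit (c :: v) with
      | nil =>
        -- the whole (already-stripped) line is digits
        have hall : ∀ x ∈ c :: v, PySem.Chars.isdigit x = true := List.dropWhile_eq_nil_iff.mp he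
        have htw : List.takeWhile PySem.Chars.isdigit (c :: v) = c :: v := pvTakeAll _ _ hall
        have ht : pvT (c :: v) = c :: v := by
          simp only [pvT]
          rw [if_neg (by rw [hC1]; exact Bool.noConfusion), pvCountDigits_eq, htw, if_neg]
          simp
        have hw : List.takeWhile (fun x => !PySem.Chars.isspace x) (c :: v) = c :: v :=
          pvTakeAll _ _ (fun x hx => by simp [pvDigitNotSpace x (hall x hx)])
        have hv' : List.dropWhile (fun x => !PySem.Chars.isspace x) (c :: v) = [] :=
          List.dropWhile_eq_nil_iff.mpr (fun x hx => by simp [pvDigitNotSpace x (hall x hx)])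
        rw [ht, pvB]
        simp only [hw, hv', List.dropWhile_nil]
        simp
      | cons p e2 =>
        have hp : PySem.Chars.isdigit p = false := pvHeadDrop _ _ _ _ he
        rw [he] at hsplit
        by_cases hds0 : List.takeWhile PySem.Chars.isdigit (c :: v) = []
        · -- no digit prefix and no marker char: A keeps the line as is
          have hcd : PySem.Chars.isdigit c = false := by
            by_contra h
            rw [Bool.not_eq_false] at h
            rw [List.takeWhile_cons, if_pos h] at hds0
            simp at hds0
          have ht : pvT (c :: v) = c :: v := by
            simp only [pvT]
            rw [if_neg (by rw [hC1]; exact Bool.noConfusion), pvCountDigits_eq, hds0, if_neg]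
            simp
          have hw : List.takeWhile (fun x => !PySem.Chars.isspace x) (c :: v)
              = c :: List.takeWhile (fun x => !PySem.Chars.isspace x) v := by
            simp [List.takeWhile_cons, hc]
          have hmk : pvMarker (c :: List.takeWhile (fun x => !PySem.Chars.isspace x) v) = false := by
            rw [pvMarker, PySem.Chars.slice_eq_listSlice, pvSliceDropLast]
            cases htv : List.takeWhile (fun x => !PySem.Chars.isspace x) v with
            | nil => simp [PySem.Chars.strIsdigit, hcne.1, hcne.2.1, hcne.2.2]
            | cons z zs =>
              have : (c :: z :: zs).dropLast = c :: (z :: zs).dropLast := by simp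
              rw [this]
              simp [PySem.Chars.strIsdigit, hcd, hcne.1, hcne.2.1, hcne.2.2]
          rw [ht, pvB]
          simp only [hw]
          rw [hmk]
          split <;> [rfl; (split <;> [rfl; rfl])]
        · -- digit prefix present
          set ds := List.takeWhile PySem.Chars.isdigit (c :: v) with hds_def
          have hcdig : PySem.Chars.isdigit c = true := by
            by_contra h
            rw [Bool.not_eq_true] at h
            rw [hds_def, List.takeWhile_cons, if_neg (by simp [h])] at hds0
            exact hds0 rfl
          have hcb : c ≠ '`' := pvDigitNe c '`' hcdig (by decide)
          have hdsp : ∀ x ∈ ds, (!PySem.Chars.isspace x) = true :=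
            fun x hx => by simp [pvDigitNotSpace x (hds x hx)]
          have hjlen : ds.length ≠ 0 := by
            simpa using hds0
          have hgetp : PySem.List.pyGet? (c :: v) ((ds.length : ℕ) : ℤ) = some p := by
            rw [pvGetNat, ← hsplit, List.getElem?_append_right (le_refl _)]
            simp
          have hlen : (c :: v).length = ds.length + 1 + e2.length := by
            rw [← hsplit]; simp <;> omega
          by_cases hpd : p = '.' ∨ p = ')'
          · -- digits followed by "." or ")": A's first test of the numbered marker holds
            have hpd' : (p == '.' || p == ')') = true := by rcases hpd with rfl | rfl <;> decide
            have hpsp : PySem.Chars.isspace p = false := by rcases hpd with rfl | rfl <;> decide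
            have hcond2a : (decide (0 < pvCountDigits (c :: v)) && decide (pvCountDigits (c :: v) < (c :: v).length)
                && ((PySem.List.pyGet? (c :: v) ((pvCountDigits (c :: v) : ℕ) : ℤ)).elim false
                    fun x => x == '.' || x == ')')) = true := by
              rw [pvCountDigits_eq, ← hds_def, hgetp]
              simp [hpd', hlen] <;> omega
            cases e2 with
            | nil =>
              -- the marker ends the line ("1." alone): nothing follows, nothing stripped
              have ht : pvT (c :: v) = c :: v := by
                simp only [pvT]
                rw [if_neg (by rw [hC1]; exact Bool.noConfusion), if_pos hcond2a, if_neg]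
                rw [pvCountDigits_eq, ← hds_def]
                simp [hlen]
              have hw : List.takeWhile (fun x => !PySem.Chars.isspace x) (c :: v) = c :: v := by
                rw [← hsplit]
                rw [pvTakeAppend _ _ _ hdsp]
                simp [List.takeWhile_cons, hpsp]
              have hv' : List.dropWhile (fun x => !PySem.Chars.isspace x) (c :: v) = [] := by
                rw [← hsplit, pvDropAppend _ _ _ hdsp]
                simp [List.dropWhile_cons, hpsp]
              rw [ht, pvB]
              simp only [hw, hv', List.dropWhile_nil]
              simp
            | cons d rest =>
              by_cases hd : PySem.Chars.isspace d = true
              · -- "12. xxx": strip the marker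
                have hget2 : PySem.List.pyGet? (c :: v) (((ds.length + 1 : ℕ) : ℕ) : ℤ) = some d := by
                  rw [pvGetNat, ← hsplit, List.getElem?_append_right (by omega)]
                  simp
                have ht : pvT (c :: v) = List.dropWhile PySem.Chars.isspace rest := by
                  simp only [pvT]
                  rw [if_neg (by rw [hC1]; exact Bool.noConfusion), if_pos hcond2a, if_pos]
                  · rw [pvCountDigits_eq, ← hds_def]
                    rw [show ((ds.length + 1 : ℕ) : ℤ) + 1 = (((ds.length + 2 : ℕ) : ℕ) : ℤ) by push_cast; ring,
                      pvSliceFrom]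
                    have hshape : c :: v = (ds ++ [p, d]) ++ rest := by rw [← hsplit]; simp
                    rw [hshape, show ds.length + 2 = (ds ++ [p, d]).length by simp, List.drop_left]
                    rfl
                  · rw [pvCountDigits_eq, ← hds_def, hget2]
                    simp [hlen, hd] <;> omega
                have hw : List.takeWhile (fun x => !PySem.Chars.isspace x) (c :: v) = ds ++ [p] := by
                  rw [← hsplit, pvTakeAppend _ _ _ hdsp]
                  simp [List.takeWhile_cons, hpsp, hd]
                have hv' : List.dropWhile (fun x => !PySem.Chars.isspace x) (c :: v) = d :: rest := by
                  rw [← hsplit, pvDropAppend _ _ _ hdsp]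
                  simp [List.dropWhile_cons, hpsp, hd]
                have hr : List.dropWhile PySem.Chars.isspace (d :: rest)
                    = List.dropWhile PySem.Chars.isspace rest := by
                  simp [List.dropWhile_cons, hd]
                have hmk : pvMarker (ds ++ [p]) = true := by
                  rw [pvMarker, PySem.Chars.slice_eq_listSlice, pvSliceDropLast, List.dropLast_concat,
                    pvGetLast]
                  have : PySem.Chars.strIsdigit ds = true := by
                    simp [PySem.Chars.strIsdigit, List.all_eq_true]
                    exact ⟨by simpa using hjlen, hds⟩
                  simp [this, hpd']
                rw [ht, pvB]
                simp only [hw, hv', hr]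
                by_cases hrn : List.dropWhile PySem.Chars.isspace rest = []
                · rw [if_neg (by simp), if_pos hrn, hrn, pvSwNil, pvSwCons c _ hcb]
                · rw [if_neg (by simp), if_neg hrn, if_pos (by rw [hmk])]
              · -- "12.x": no whitespace after the marker, nothing stripped
                have hd' : PySem.Chars.isspace d = false := by simpa using hd
                have hget2 : PySem.List.pyGet? (c :: v) (((ds.length + 1 : ℕ) : ℕ) : ℤ) = some d := by
                  rw [pvGetNat, ← hsplit, List.getElem?_append_right (by omega)]
                  simp
                have ht : pvT (c :: v) = c :: v := by
                  simp only [pvT]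
                  rw [if_neg (by rw [hC1]; exact Bool.noConfusion), if_pos hcond2a, if_neg]
                  rw [pvCountDigits_eq, ← hds_def, hget2]
                  simp [hd']
                have hw : List.takeWhile (fun x => !PySem.Chars.isspace x) (c :: v)
                    = ds ++ p :: d :: List.takeWhile (fun x => !PySem.Chars.isspace x) rest := by
                  rw [← hsplit, pvTakeAppend _ _ _ hdsp]
                  simp [List.takeWhile_cons, hpsp, hd']
                have hmk : pvMarker (ds ++ p :: d :: List.takeWhile (fun x => !PySem.Chars.isspace x) rest)
                    = false := by
                  rw [pvMarker, PySem.Chars.slice_eq_listSlice, pvSliceDropLast]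
                  have h1 : (ds ++ p :: d :: List.takeWhile (fun x => !PySem.Chars.isspace x) rest).dropLast
                      = ds ++ p :: (d :: List.takeWhile (fun x => !PySem.Chars.isspace x) rest).dropLast := by
                    rw [List.dropLast_append]
                    simp
                  rw [h1]
                  have hpd2 : PySem.Chars.isdigit p = false := hp
                  have hlw : 2 ≤ (ds ++ p :: d :: List.takeWhile (fun x => !PySem.Chars.isspace x) rest).length := by
                    simp
                    omega
                  rw [pvNotSingle _ hlw, pvNotSingle _ hlw, pvNotSingle _ hlw]
                  simp [PySem.Chars.strIsdigit, hpd2]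
                rw [ht, pvB]
                simp only [hw]
                rw [hmk]
                split <;> [rfl; (split <;> [rfl; rfl])]
          · -- digits not followed by "." / ")": nothing stripped
            have hpd' : (p == '.' || p == ')') = false := by
              have h1 : p ≠ '.' := fun e => hpd (Or.inl e)
              have h2 : p ≠ ')' := fun e => hpd (Or.inr e)
              simp [h1, h2]
            have ht : pvT (c :: v) = c :: v := by
              simp only [pvT]
              rw [if_neg (by rw [hC1]; exact Bool.noConfusion), if_neg]
              rw [pvCountDigits_eq, ← hds_def, hgetp]
              simp [hpd']
            by_cases hsp : PySem.Chars.isspace p = true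
            · -- whitespace right after the digits: the first token is all digits
              have hw : List.takeWhile (fun x => !PySem.Chars.isspace x) (c :: v) = ds := by
                rw [← hsplit, pvTakeAppend _ _ _ hdsp]
                simp [List.takeWhile_cons, hsp]
              have hmk : pvMarker ds = false := by
                rw [pvMarker, PySem.Chars.slice_eq_listSlice, pvSliceDropLast]
                have hrw : ds.dropLast ++ [ds.getLast hds0] = ds := List.dropLast_append_getLast hds0
                have hg : PySem.List.pyGet? ds (-1) = some (ds.getLast hds0) := by
                  conv_lhs => rw [← hrw]
                  rw [pvGetLast]
                have hlastd : PySem.Chars.isdigit (ds.getLast hds0) = true :=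
                  hds _ (List.getLast_mem hds0)
                have hne1 : (ds.getLast hds0 == '.') = false := by
                  rw [beq_eq_false_iff_ne]; exact pvDigitNe _ _ hlastd (by decide)
                have hne2 : (ds.getLast hds0 == ')') = false := by
                  rw [beq_eq_false_iff_ne]; exact pvDigitNe _ _ hlastd (by decide)
                have hdsc : ds = c :: List.takeWhile PySem.Chars.isdigit v := by
                  rw [hds_def, List.takeWhile_cons, if_pos hcdig]
                have hs1 : (ds == ['-']) = false := by rw [hdsc]; exact pvConsNotSingle _ _ _ hcne.1
                have hs2 : (ds == ['*']) = false := by rw [hdsc]; exact pvConsNotSingle _ _ _ hcne.2.1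
                have hs3 : (ds == ['+']) = false := by rw [hdsc]; exact pvConsNotSingle _ _ _ hcne.2.2
                rw [hg]
                simp [hs1, hs2, hs3, hne1, hne2]
              rw [ht, pvB]
              simp only [hw]
              rw [hmk]
              split <;> [rfl; (split <;> [rfl; rfl])]
            · -- the first token continues past the digits
              have hpsp' : (!PySem.Chars.isspace p) = true := by simp [hsp]
              cases htw : List.takeWhile (fun x => !PySem.Chars.isspace x) e2 with
              | nil =>
                have hw : List.takeWhile (fun x => !PySem.Chars.isspace x) (c :: v) = ds ++ [p] := by
                  rw [← hsplit, pvTakeAppend _ _ _ hdsp]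
                  simp [List.takeWhile_cons, hpsp', htw]
                have hmk : pvMarker (ds ++ [p]) = false := by
                  rw [pvMarker, PySem.Chars.slice_eq_listSlice, pvSliceDropLast,
                    List.dropLast_concat, pvGetLast]
                  have hlw : 2 ≤ (ds ++ [p]).length := by simp; omega
                  rw [pvNotSingle _ hlw, pvNotSingle _ hlw, pvNotSingle _ hlw]
                  simp [hpd']
                rw [ht, pvB]
                simp only [hw]
                rw [hmk]
                split <;> [rfl; (split <;> [rfl; rfl])]
              | cons z zs =>
                have hw : List.takeWhile (fun x => !PySem.Chars.isspace x) (c :: v)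
                    = ds ++ p :: z :: zs := by
                  rw [← hsplit, pvTakeAppend _ _ _ hdsp]
                  simp [List.takeWhile_cons, hpsp', htw]
                have hmk : pvMarker (ds ++ p :: z :: zs) = false := by
                  rw [pvMarker, PySem.Chars.slice_eq_listSlice, pvSliceDropLast]
                  have h1 : (ds ++ p :: z :: zs).dropLast = ds ++ p :: (z :: zs).dropLast := by
                    rw [List.dropLast_append]
                    simp
                  rw [h1]
                  have hlw : 2 ≤ (ds ++ p :: z :: zs).length := by simp; omega
                  rw [pvNotSingle _ hlw, pvNotSingle _ hlw, pvNotSingle _ hlw]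
                  simp [PySem.Chars.strIsdigit, hp]
                rw [ht, pvB]
                simp only [hw]
                rw [hmk]
                split <;> [rfl; (split <;> [rfl; rfl])]

lemma pvSplit1 (l : List Char) :
    PySem.Chars.split₀Max l 1 =
      (if List.dropWhile PySem.Chars.isspace l = [] then []
       else
         let u := List.dropWhile PySem.Chars.isspace l
         let w := u.takeWhile (fun c => !PySem.Chars.isspace c)
         let r := List.dropWhile PySem.Chars.isspace (u.dropWhile (fun c => !PySem.Chars.isspace c))
         if r = [] then [w] else [w, r]) := by
  rw [PySem.Chars.split₀Max]
  norm_num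
  rw [show l.length + 1 = Nat.succ l.length from rfl, PySem.Chars.split₀Max.go]
  cases hu : List.dropWhile PySem.Chars.isspace l with
  | nil => simpa using List.dropWhile_eq_nil_iff.mp hu
  | cons c v =>
    have hA : ¬ ∀ x ∈ l, PySem.Chars.isspace x = true := by
      intro h
      rw [List.dropWhile_eq_nil_iff.mpr h] at hu; simp at hu
    have hlen : v.length + 1 ≤ l.length := by
      have h := List.length_dropWhile_le (p := PySem.Chars.isspace) (l := l)
      rw [hu] at h; simpa using h
    obtain ⟨n, hn⟩ : ∃ n, l.length = n + 1 := ⟨l.length - 1, by omega⟩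
    norm_num
    rw [hn, show n + 1 = Nat.succ n from rfl, PySem.Chars.split₀Max.go]
    cases hr : List.dropWhile PySem.Chars.isspace
        (List.dropWhile (fun c => !PySem.Chars.isspace c) (c :: v)) with
    | nil =>
      simp only [hr, List.reverse_cons, List.reverse_nil, List.nil_append]
      rw [if_neg hA, if_pos (List.dropWhile_eq_nil_iff.mp hr)]
    | cons x y =>
      have hB : ¬ ∀ z ∈ List.dropWhile (fun c => !PySem.Chars.isspace c) (c :: v),
          PySem.Chars.isspace z = true := by
        intro h
        rw [List.dropWhile_eq_nil_iff.mpr h] at hr; simp at hr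
      simp only [hr]
      rw [if_neg hA, if_neg hB]
      simp

lemma pvA_eq (line : String) :
    is_fence_py line
      = PySem.Chars.startswith (pvT (List.dropWhile PySem.Chars.isspace line.toList)) pvFence := rfl

lemma pvB_eq (line : String) :
    is_fence_py_alt line = pvB (List.dropWhile PySem.Chars.isspace line.toList) := by
  simp only [is_fence_py_alt, pvSplit1, PySem.Chars.lstrip]
  by_cases h : List.dropWhile PySem.Chars.isspace line.toList = []
  · rw [if_pos h, pvB]
    simp [h, pvFence]
  · rw [if_neg h]
    by_cases hr : List.dropWhile PySem.Chars.isspace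
        (List.dropWhile (fun c => !PySem.Chars.isspace c)
          (List.dropWhile PySem.Chars.isspace line.toList)) = []
    · rw [if_pos hr, pvB]
      simp [h, hr, pvFence]
    · rw [if_neg hr, pvB]
      simp only [pvMarker, pvFence, PySem.Chars.lstrip]
      rw [if_neg h, if_neg hr]

-- ===== VERDICT (by name: the statement is the Claim_ definition above) =====
theorem is_fence_py_spec : Claim_equal_is_fence_py := by
  intro line _
  unfold Spec_is_fence_py
  rw [pvB_eq, pvA_eq, pvMain _ (List.dropWhile_idempotent _ _)]
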